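-- pv_equiv track=rewrite | github.com/sqsltr520/FATE | python/federatedml/cipher_compressor/packer.py | _unpack_an_int
-- ===== SOURCE A (Python) =====
-- def _unpack_an_int(integer: int, bit_assign_list: list):
--
--     rs_list = []
--     for bit_assign in reversed(bit_assign_list[1:]):
--         mask_int = (2**bit_assign) - 1
--         unpack_int = integer & mask_int
--         rs_list.append(unpack_int)
--         integer = integer >> bit_assign
--     rs_list.append(integer)
--
--     return list(reversed(rs_list))
-- ===== SOURCE B (Python) =====
-- def _unpack_an_int(integer: int, bit_assign_list: list):
--     widths = bit_assign_list[1:]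
--     total = sum(widths)
--     result = [integer >> total]
--     offset = total
--     for width in widths:
--         offset -= width
--         result.append((integer >> offset) & ((1 << width) - 1))
--     return result
-- ===== Notes on version B (the rewrite author's own statement) =====
-- stated objective: simpler
-- what changed: B never mutates the integer and never reverses: it precomputes the total width, emits the high chunk first, then walks the widths forward with a descending offset, extracting each field by one shift-and-mask from the original integer.
import Mathlib
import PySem

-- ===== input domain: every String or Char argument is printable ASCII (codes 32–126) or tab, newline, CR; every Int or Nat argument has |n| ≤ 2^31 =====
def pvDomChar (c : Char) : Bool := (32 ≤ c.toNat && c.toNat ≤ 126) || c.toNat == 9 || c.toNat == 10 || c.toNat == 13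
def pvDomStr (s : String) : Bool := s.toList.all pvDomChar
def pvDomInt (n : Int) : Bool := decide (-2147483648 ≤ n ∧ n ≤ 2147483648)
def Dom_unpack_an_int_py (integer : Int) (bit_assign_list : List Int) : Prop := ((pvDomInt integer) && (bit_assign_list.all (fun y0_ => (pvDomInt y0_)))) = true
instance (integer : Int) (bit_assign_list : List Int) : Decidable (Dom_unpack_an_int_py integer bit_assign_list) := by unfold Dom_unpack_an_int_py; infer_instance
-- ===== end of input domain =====

-- ===== PORT A =====
-- One honest line: B replaces A's reverse/mutate/reverse loop by a forward offset walk
-- over the widths, extracting each chunk from the untouched integer; objective: simpler.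
-- Port of A: the loop over reversed(bit_assign_list[1:]) is a foldl over the reversed
-- drop-1 list carrying (rs_list, integer); '2**bit_assign' is 2 ^ bit_assign.toNat and
-- 'integer >> bit_assign' is '>>> bit_assign.toNat' — exact for bit_assign ≥ 0 (Pre_;
-- Python raises on negative widths).
def unpack_an_int_py (integer : Int) (bit_assign_list : List Int) : List Int :=
  let p := ((bit_assign_list.drop 1).reverse).foldl
    (fun (st : List Int × Int) (bit_assign : Int) =>
      let mask_int : Int := 2 ^ bit_assign.toNat - 1
      let unpack_int : Int := PySem.Int.band st.2 mask_int
      (st.1 ++ [unpack_int], st.2 >>> bit_assign.toNat)) ([], integer)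
  (p.1 ++ [p.2]).reverse

-- ===== PORT B =====
-- B's forward loop: offset decreases by each width; each chunk is one shift-and-mask.
def unpackAltChunks (integer : Int) : List Int → Int → List Int
  | [], _ => []
  | width :: ws, offset =>
    let offset' := offset - width
    (PySem.Int.band (integer >>> offset'.toNat) (((1 : Int) <<< width.toNat) - 1))
      :: unpackAltChunks integer ws offset'

def unpack_an_int_py_alt (integer : Int) (bit_assign_list : List Int) : List Int :=
  let widths := bit_assign_list.drop 1
  let total := widths.foldl (· + ·) 0
  (integer >>> total.toNat) :: unpackAltChunks integer widths total

-- ===== PRECONDITION & SPEC =====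
-- Pre_ excludes negative widths in bit_assign_list[1:], on which Python A raises
-- (TypeError: 2**negative is a float and cannot be '&'-ed with an int).
def Pre_unpack_an_int_py (integer : Int) (bit_assign_list : List Int) : Prop :=
  ∀ b ∈ bit_assign_list.drop 1, 0 ≤ b
instance (integer : Int) (bit_assign_list : List Int) : Decidable (Pre_unpack_an_int_py integer bit_assign_list) := by unfold Pre_unpack_an_int_py; infer_instance

def pvWitness_unpack_an_int_py : Int × List Int := (1000, [3, 4, 5])

def Spec_unpack_an_int_py (integer : Int) (bit_assign_list : List Int) (out : List Int) : Prop := out = unpack_an_int_py_alt integer bit_assign_list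
instance (integer : Int) (bit_assign_list : List Int) (out : List Int) : Decidable (Spec_unpack_an_int_py integer bit_assign_list out) := by unfold Spec_unpack_an_int_py; infer_instance

-- ===== CLAIM (what is proved, stated in full; the proofs are below) =====
def Claim_equal_unpack_an_int_py : Prop := ∀ (integer : Int) (bit_assign_list : List Int), Dom_unpack_an_int_py integer bit_assign_list → Pre_unpack_an_int_py integer bit_assign_list → Spec_unpack_an_int_py integer bit_assign_list (unpack_an_int_py integer bit_assign_list)

-- ===== LEMMAS AND PROOFS =====

theorem foldl_add_shift (l : List Int) (c : Int) :
    l.foldl (· + ·) c = c + l.foldl (· + ·) 0 := by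
  induction l generalizing c with
  | nil => simp
  | cons x xs ih => simp only [List.foldl_cons]; rw [ih (c + x), ih (0 + x)]; ring

theorem sum_nonneg_of_mem (l : List Int) (h : ∀ b ∈ l, 0 ≤ b) :
    0 ≤ l.foldl (· + ·) 0 := by
  induction l with
  | nil => simp
  | cons x xs ih =>
    simp only [List.foldl_cons]
    rw [foldl_add_shift]
    have hx := h x (by simp)
    have := ih (fun b hb => h b (by simp [hb]))
    omega

theorem unpack_core (n : Int) (w : List Int) (h : ∀ b ∈ w, 0 ≤ b) :
    ((w.reverse.foldl
        (fun (st : List Int × Int) (bit_assign : Int) =>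
          (st.1 ++ [PySem.Int.band st.2 (2 ^ bit_assign.toNat - 1)],
           st.2 >>> bit_assign.toNat)) ([], n)).1 ++
      [(w.reverse.foldl
        (fun (st : List Int × Int) (bit_assign : Int) =>
          (st.1 ++ [PySem.Int.band st.2 (2 ^ bit_assign.toNat - 1)],
           st.2 >>> bit_assign.toNat)) ([], n)).2]).reverse
      = (Int.shiftRight n (w.foldl (· + ·) 0).toNat)
          :: unpackAltChunks n w (w.foldl (· + ·) 0) := by
  induction w with
  | nil =>
    cases n <;> simp [unpackAltChunks, Int.shiftRight]
  | cons b ws ih =>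
    have hb : 0 ≤ b := h b (by simp)
    have hws : ∀ x ∈ ws, 0 ≤ x := fun x hx => h x (by simp [hx])
    have hS : 0 ≤ ws.foldl (· + ·) 0 := sum_nonneg_of_mem ws hws
    set step := fun (st : List Int × Int) (bit_assign : Int) =>
      (st.1 ++ [PySem.Int.band st.2 (2 ^ bit_assign.toNat - 1)],
       st.2 >>> bit_assign.toNat) with hstep
    set p := (ws.reverse).foldl step ([], n) with hp
    have ih' := ih hws
    have h2 : p.2 = Int.shiftRight n (ws.foldl (· + ·) 0).toNat := by
      have := congrArg (fun l => l.headI) ih'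
      simpa using this
    have h1 : p.1.reverse = unpackAltChunks n ws (ws.foldl (· + ·) 0) := by
      have := congrArg (fun l => l.tail) ih'
      simpa using this
    have hfold : ((b :: ws).reverse).foldl step ([], n) = step p b := by
      rw [List.reverse_cons, List.foldl_append, List.foldl_cons, List.foldl_nil, hp]
    rw [hfold]
    set S := ws.foldl (· + ·) 0 with hSdef
    have htot : (b :: ws).foldl (· + ·) 0 = b + S := by
      simp only [List.foldl_cons]
      rw [hSdef, foldl_add_shift]
      ring
    rw [htot]
    simp only [hstep, List.reverse_append, List.reverse_cons, List.reverse_nil,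
      List.nil_append, List.cons_append, List.append_assoc, h1, h2, unpackAltChunks]
    have e0 : b + S - b = S := by ring
    rw [e0]
    have e1 : (b + S).toNat = S.toNat + b.toNat := by omega
    rw [e1]
    have e2 : Int.shiftRight n (S.toNat + b.toNat)
        = (Int.shiftRight n S.toNat) >>> b.toNat := Int.shiftRight_add n S.toNat b.toNat
    rw [e2]
    have e3 : ((1 : Int) <<< b.toNat) - 1 = 2 ^ b.toNat - 1 := by
      rw [Int.shiftLeft_eq]; ring
    have e4 : (n >>> S.toNat : Int) = Int.shiftRight n S.toNat := rfl
    rw [e3, e4]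

-- ===== VERDICT (by name: the statement is the Claim_ definition above) =====
theorem unpack_an_int_py_spec : Claim_equal_unpack_an_int_py := by
  intro integer bit_assign_list _hdom hpre
  unfold Spec_unpack_an_int_py
  simp only [unpack_an_int_py, unpack_an_int_py_alt]
  exact unpack_core integer (bit_assign_list.drop 1) hpre
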